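-- pv_equiv track=rewrite | github.com/ryukinix/pyzumbi-amazon | exercícios/Lista XIII/Lista_13_Google_Python_Class_1.py | x_antes
-- ===== SOURCE A (Python) =====
-- def x_antes(words):
--   x_start = []
--   tail = []
--   for word in words:
--     if word[0] == 'x':
--       x_start.append(word)
--     else:
--       tail.append(word)
--   x_start = sorted(x_start)
--   tail = sorted(tail)
--
--   for i in tail:
--     x_start.append(i)
--
--   return x_start
-- ===== SOURCE B (Python) =====
-- def x_antes(words):
--   return sorted(words, key=lambda w: (w[0] != 'x', w))
-- ===== Notes on version B (the rewrite author's own statement) =====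
-- stated objective: idiomatic
-- what changed: Replaces the explicit partition into two buckets, two separate sorts and an append loop by a single sorted() call with the tuple key (w[0] != 'x', w), which orders x-words first and lexicographically within each group.
import Mathlib
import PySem

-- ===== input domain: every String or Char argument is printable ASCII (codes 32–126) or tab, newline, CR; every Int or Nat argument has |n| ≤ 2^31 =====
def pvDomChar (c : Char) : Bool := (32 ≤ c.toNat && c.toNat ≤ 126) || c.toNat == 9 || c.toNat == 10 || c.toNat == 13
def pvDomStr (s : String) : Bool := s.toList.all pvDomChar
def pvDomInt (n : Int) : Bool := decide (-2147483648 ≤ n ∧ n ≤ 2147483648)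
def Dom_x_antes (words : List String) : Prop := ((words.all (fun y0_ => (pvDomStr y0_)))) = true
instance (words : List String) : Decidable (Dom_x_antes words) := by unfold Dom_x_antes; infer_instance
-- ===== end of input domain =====

-- B replaces A's partition + two sorts + append loop by one sorted() call with the
-- tuple key (w[0] != 'x', w); same cost, more idiomatic.
-- Pre_ excludes lists containing the empty string, on which Python A raises IndexError
-- at word[0] (B raises there too).


-- ===== PORT A =====
def x_antes (words : List String) : List String :=
  let p := words.foldl
    (fun (st : List String × List String) word =>
      if PySem.Str.pyGet? word 0 = some 'x' then (st.1 ++ [word], st.2)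
      else (st.1, st.2 ++ [word]))
    ([], [])
  let x_start := PySem.List.sorted p.1 (fun w => w)
  let tail := PySem.List.sorted p.2 (fun w => w)
  tail.foldl (fun acc i => acc ++ [i]) x_start

-- ===== PORT B =====
def x_antes_alt (words : List String) : List String :=
  PySem.List.sorted2 words
    (fun w => decide (¬ (PySem.Str.pyGet? w 0 = some 'x')))
    (fun w => w)

-- ===== PRECONDITION & SPEC =====
-- Pre_ excludes lists containing the empty string: Python A raises IndexError at word[0]
-- there (and B raises identically), so no return value of A is claimed.
def Pre_x_antes (words : List String) : Prop := (words.all (fun w => !w.toList.isEmpty)) = true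
instance (words : List String) : Decidable (Pre_x_antes words) := by unfold Pre_x_antes; infer_instance
def pvWitness_x_antes : List String := (["mix", "xyz", "apple", "xanadu"])
def Spec_x_antes (words : List String) (out : List String) : Prop := out = x_antes_alt words
instance (words : List String) (out : List String) : Decidable (Spec_x_antes words out) := by unfold Spec_x_antes; infer_instance

-- ===== CLAIM (what is proved, stated in full; the proofs are below) =====
def Claim_equal_x_antes : Prop := ∀ (words : List String), Dom_x_antes words → Pre_x_antes words → Spec_x_antes words (x_antes words)

-- ===== LEMMAS AND PROOFS =====

-- The test A makes on each word, as a Bool.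
def pvIsX (w : String) : Bool := decide (PySem.Str.pyGet? w 0 = some 'x')

-- insertBy only looks at `before x ·` on the members of the list.
theorem pvInsertBy_congr {α : Type} (f g : α → α → Bool) (x : α) (ys : List α)
    (h : ∀ y ∈ ys, f x y = g x y) :
    PySem.List.insertBy f x ys = PySem.List.insertBy g x ys := by
  induction ys with
  | nil => rfl
  | cons y ys ih =>
    simp only [PySem.List.insertBy, h y (by simp)]
    by_cases hg : g x y = true
    · simp [hg]
    · simp only [Bool.not_eq_true] at hg
      simp [hg, ih (fun z hz => h z (by simp [hz]))]

-- If x goes before every element of bs, inserting into as ++ bs inserts into as.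
theorem pvInsertBy_append_left {α : Type} (bef : α → α → Bool) (x : α)
    (as bs : List α) (h : ∀ b ∈ bs, bef x b = true) :
    PySem.List.insertBy bef x (as ++ bs) = PySem.List.insertBy bef x as ++ bs := by
  induction as with
  | nil =>
    cases bs with
    | nil => rfl
    | cons b bs => simp [PySem.List.insertBy, h b (by simp)]
  | cons a as ih =>
    by_cases ha : bef x a = true
    · simp [PySem.List.insertBy, ha]
    · simp only [Bool.not_eq_true] at ha
      simp [PySem.List.insertBy, ha, ih]

-- If x goes before no element of as, inserting into as ++ bs inserts into bs.
theorem pvInsertBy_append_right {α : Type} (bef : α → α → Bool) (x : α)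
    (as bs : List α) (h : ∀ a ∈ as, bef x a = false) :
    PySem.List.insertBy bef x (as ++ bs) = as ++ PySem.List.insertBy bef x bs := by
  induction as with
  | nil => rfl
  | cons a as ih =>
    simp [PySem.List.insertBy, h a (by simp), ih (fun z hz => h z (by simp [hz]))]

-- B's comparison function (sorted2's `lt` with reverse = false and B's two keys).
def pvBef2 (a b : String) : Bool :=
  decide ((decide (¬ (PySem.Str.pyGet? a 0 = some 'x'))) < decide (¬ (PySem.Str.pyGet? b 0 = some 'x'))) ||
    (!decide ((decide (¬ (PySem.Str.pyGet? b 0 = some 'x'))) < decide (¬ (PySem.Str.pyGet? a 0 = some 'x'))) &&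
      decide (a < b))

theorem pvSorted2_eq_foldl (l : List String) :
    x_antes_alt l = l.foldl (fun acc x => PySem.List.insertBy pvBef2 x acc) [] := rfl

-- Membership facts for the sorted buckets.
theorem pvMem_sorted_isX {l : List String} {p : String → Bool} {y : String}
    (hy : y ∈ PySem.List.sorted (l.filter p) (fun w => w)) : p y = true := by
  rw [PySem.List.mem_sorted] at hy
  exact (List.mem_filter.mp hy).2

-- Main invariant: B's insertion sort with the tuple key equals
-- sorted bucket of x-words ++ sorted bucket of the rest.
theorem pvMain (l : List String) :
    l.foldl (fun acc x => PySem.List.insertBy pvBef2 x acc) [] =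
      PySem.List.sorted (l.filter pvIsX) (fun w => w) ++
      PySem.List.sorted (l.filter (fun w => !pvIsX w)) (fun w => w) := by
  induction l using List.reverseRecOn with
  | nil => rfl
  | append_singleton l x ih =>
    have hs : ∀ (m : List String), PySem.List.sorted (m ++ [x]) (fun w => w) =
        PySem.List.insertBy (fun a b => decide (a < b)) x (PySem.List.sorted m (fun w => w)) := by
      intro m
      rw [PySem.List.sorted_eq_foldl_insertBy, PySem.List.sorted_eq_foldl_insertBy,
        List.foldl_append]
      rfl
    rw [List.foldl_append, List.foldl_cons, List.foldl_nil, ih]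
    by_cases hx : pvIsX x = true
    · -- x-word: goes into the left bucket
      have hxP : PySem.List.pyGet? x.toList 0 = some 'x' := by simpa [pvIsX, PySem.Str.pyGet?] using hx
      have h1 : List.filter pvIsX [x] = [x] := by simp [hx]
      have h2 : List.filter (fun w => !pvIsX w) [x] = [] := by simp [hx]
      rw [List.filter_append, List.filter_append, h1, h2, List.append_nil, hs]
      rw [pvInsertBy_append_left pvBef2 x _ _ (by
        intro b hb
        have hbP : ¬ (PySem.List.pyGet? b.toList 0 = some 'x') := by
          have := pvMem_sorted_isX (p := fun w => !pvIsX w) hb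
          simpa [pvIsX, PySem.Str.pyGet?] using this
        simp [pvBef2, hxP, hbP])]
      congr 1
      exact pvInsertBy_congr _ _ _ _ (by
        intro y hy
        have hyP : PySem.List.pyGet? y.toList 0 = some 'x' := by
          simpa [pvIsX, PySem.Str.pyGet?] using pvMem_sorted_isX (p := pvIsX) hy
        simp [pvBef2, hxP, hyP])
    · -- non-x word: goes into the right bucket
      have hxP : ¬ (PySem.List.pyGet? x.toList 0 = some 'x') := by simpa [pvIsX, PySem.Str.pyGet?] using hx
      have hx' : pvIsX x = false := by simpa using hx
      have h1 : List.filter pvIsX [x] = [] := by simp [hx']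
      have h2 : List.filter (fun w => !pvIsX w) [x] = [x] := by simp [hx']
      rw [List.filter_append, List.filter_append, h1, h2, List.append_nil, hs]
      rw [pvInsertBy_append_right pvBef2 x _ _ (by
        intro a ha
        have haP : PySem.List.pyGet? a.toList 0 = some 'x' := by
          simpa [pvIsX, PySem.Str.pyGet?] using pvMem_sorted_isX (p := pvIsX) ha
        simp [pvBef2, hxP, haP])]
      congr 1
      exact pvInsertBy_congr _ _ _ _ (by
        intro y hy
        have hyP : ¬ (PySem.List.pyGet? y.toList 0 = some 'x') := by
          have := pvMem_sorted_isX (p := fun w => !pvIsX w) hy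
          simpa [pvIsX, PySem.Str.pyGet?] using this
        simp [pvBef2, hxP, hyP])

-- A's partition loop produces exactly the two filters.
theorem pvPartition (l : List String) (a b : List String) :
    l.foldl (fun (st : List String × List String) word =>
      if PySem.Str.pyGet? word 0 = some 'x' then (st.1 ++ [word], st.2)
      else (st.1, st.2 ++ [word])) (a, b) =
    (a ++ l.filter pvIsX, b ++ l.filter (fun w => !pvIsX w)) := by
  induction l generalizing a b with
  | nil => simp
  | cons w l ih =>
    simp only [List.foldl_cons]
    by_cases hw : PySem.List.pyGet? w.toList 0 = some 'x'
    · have hp : pvIsX w = true := by simp [pvIsX, PySem.Str.pyGet?, hw]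
      rw [if_pos (by simpa [PySem.Str.pyGet?] using hw), ih]
      simp [hp]
    · have hp : pvIsX w = false := by simp [pvIsX, PySem.Str.pyGet?, hw]
      rw [if_neg (by simpa [PySem.Str.pyGet?] using hw), ih]
      simp [hp]

-- A's final append loop is list append.
theorem pvFoldAppend (t acc : List String) :
    t.foldl (fun acc i => acc ++ [i]) acc = acc ++ t := by
  induction t generalizing acc with
  | nil => simp
  | cons x t ih => simp [List.foldl_cons, ih]

-- ===== VERDICT (by name: the statement is the Claim_ definition above) =====
theorem x_antes_spec : Claim_equal_x_antes := by
  intro words _ _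
  unfold Spec_x_antes x_antes
  rw [pvSorted2_eq_foldl, pvMain]
  simp only [pvPartition words [] []]
  rw [pvFoldAppend]
  simp
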